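-- pv_equiv track=rewrite | github.com/gahjelle/advent_of_code | python/2021/23_amphipod/aoc202123.py | get_rooms
-- ===== SOURCE A (Python) =====
-- from typing import ClassVar, NamedTuple
--
-- class Neighbor(NamedTuple):
--     id: int
--     distance: int
--     blocked_by: list[int]
--
-- def get_rooms(num_rows, hallway):
--     """Set up room neighbors"""
--     neighbors = []
--     for col, (distance, blocked_by) in enumerate(hallway):
--         room_blockers = []
--         for row in range(num_rows):
--             room_id = 7 + row * 4 + col
--             neighbors.append(
--                 Neighbor(room_id, distance + row, blocked_by + room_blockers)
--             )
--             room_blockers.append(room_id)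
--
--     return sorted(neighbors, key=lambda nb: nb.distance)
-- ===== SOURCE B (Python) =====
-- from typing import NamedTuple
--
-- class Neighbor(NamedTuple):
--     id: int
--     distance: int
--     blocked_by: list[int]
--
-- def _merge(xs, ys):
--     """Stable two-pointer merge of two lists sorted by distance (ties keep xs first)"""
--     i, j, out = 0, 0, []
--     while i < len(xs) and j < len(ys):
--         if xs[i].distance <= ys[j].distance:
--             out.append(xs[i])
--             i += 1
--         else:
--             out.append(ys[j])
--             j += 1
--     return out + xs[i:] + ys[j:]
--
-- def get_rooms(num_rows, hallway):
--     """Set up room neighbors: each column is sorted by construction, so merge columns instead of sorting"""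
--     result = []
--     for col, (distance, blocked_by) in enumerate(hallway):
--         ids = [7 + row * 4 + col for row in range(num_rows)]
--         column = [
--             Neighbor(id_, distance + row, blocked_by + ids[:row])
--             for row, id_ in enumerate(ids)
--         ]
--         result = _merge(result, column)
--     return result
-- ===== Notes on version B (the rewrite author's own statement) =====
-- stated objective: alternative
-- what changed: B never calls sorted(): it exploits that each column's neighbors are emitted with strictly increasing distance, builds each column already sorted (ids precomputed, blockers by slicing, no mutated accumulator), and combines columns with a stable two-pointer merge that breaks ties toward earlier columns.
import Mathlib
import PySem

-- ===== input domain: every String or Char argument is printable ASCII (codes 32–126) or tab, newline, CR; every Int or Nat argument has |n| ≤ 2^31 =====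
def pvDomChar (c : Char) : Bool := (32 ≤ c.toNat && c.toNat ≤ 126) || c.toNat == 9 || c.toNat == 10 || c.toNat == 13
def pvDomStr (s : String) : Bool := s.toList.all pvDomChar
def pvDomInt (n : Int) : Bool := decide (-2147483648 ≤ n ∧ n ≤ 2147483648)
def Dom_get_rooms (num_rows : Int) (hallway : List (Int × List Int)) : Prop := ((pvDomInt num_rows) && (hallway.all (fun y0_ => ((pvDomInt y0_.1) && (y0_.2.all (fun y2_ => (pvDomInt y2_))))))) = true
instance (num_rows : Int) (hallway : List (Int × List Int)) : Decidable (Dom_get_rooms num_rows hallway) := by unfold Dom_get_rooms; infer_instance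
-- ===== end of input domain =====

-- B builds every column already sorted (its distances increase) and combines columns by a stable two-pointer merge instead of A's build-then-sorted(); alternative algorithm, same output.

-- ===== PORT A =====
def get_rooms (num_rows : Int) (hallway : List (Int × List Int)) : List (Int × Int × List Int) :=
  let neighbors :=
    (PySem.List.enumerate hallway).foldl
      (fun (acc : List (Int × Int × List Int)) p =>
        ((PySem.List.pyRange 0 num_rows 1).foldl
          (fun (s : List (Int × Int × List Int) × List Int) row =>
            let room_id := 7 + row * 4 + p.1
            (s.1 ++ [(room_id, p.2.1 + row, p.2.2 ++ s.2)], s.2 ++ [room_id]))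
          (acc, [])).1)
      []
  PySem.List.sorted neighbors (fun nb => nb.2.1) false

-- ===== PORT B =====
-- port of Source B's _merge: the two-pointer while loop over (i, j) as the structural recursion on the two remaining lists
def pvMerge : List (Int × Int × List Int) → List (Int × Int × List Int) → List (Int × Int × List Int)
  | [], ys => ys
  | x :: xs, [] => x :: xs
  | x :: xs, y :: ys =>
      if x.2.1 ≤ y.2.1 then x :: pvMerge xs (y :: ys) else y :: pvMerge (x :: xs) ys

def get_rooms_alt (num_rows : Int) (hallway : List (Int × List Int)) : List (Int × Int × List Int) :=
  (PySem.List.enumerate hallway).foldl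
    (fun (res : List (Int × Int × List Int)) p =>
      let ids := (PySem.List.pyRange 0 num_rows 1).map (fun row => 7 + row * 4 + p.1)
      let column := (PySem.List.enumerate ids).map
        (fun q => (q.2, p.2.1 + q.1, p.2.2 ++ PySem.List.slice ids none (some q.1)))
      pvMerge res column)
    []

-- ===== PRECONDITION & SPEC =====
def Spec_get_rooms (num_rows : Int) (hallway : List (Int × List Int)) (out : List (Int × Int × List Int)) : Prop := out = get_rooms_alt num_rows hallway
instance (num_rows : Int) (hallway : List (Int × List Int)) (out : List (Int × Int × List Int)) : Decidable (Spec_get_rooms num_rows hallway out) := by unfold Spec_get_rooms; infer_instance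

-- ===== CLAIM (what is proved, stated in full; the proofs are below) =====
def Claim_equal_get_rooms : Prop := ∀ (num_rows : Int) (hallway : List (Int × List Int)), Dom_get_rooms num_rows hallway → Spec_get_rooms num_rows hallway (get_rooms num_rows hallway)

-- ===== LEMMAS AND PROOFS =====

-- the per-column closed form of the neighbors A generates
def pvGen (num_rows : Int) (p : Int × (Int × List Int)) : List (Int × Int × List Int) :=
  (List.range num_rows.toNat).map (fun (k : Nat) =>
    (7 + (k : Int) * 4 + p.1, p.2.1 + (k : Int),
     p.2.2 ++ (List.range k).map (fun (j : Nat) => 7 + (j : Int) * 4 + p.1)))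

-- closed form of A's inner accumulator fold over range n
theorem aInner_closed (col d : Int) (bs : List Int) (n : Nat) (acc : List (Int × Int × List Int)) :
    ((List.range n).foldl
      (fun (s : List (Int × Int × List Int) × List Int) (k : Nat) =>
        (s.1 ++ [(7 + (k : Int) * 4 + col, d + (k : Int), bs ++ s.2)],
         s.2 ++ [7 + (k : Int) * 4 + col]))
      (acc, []))
    = (acc ++ (List.range n).map (fun (k : Nat) => ((7 + (k : Int) * 4 + col, d + (k : Int),
          bs ++ (List.range k).map (fun (j : Nat) => 7 + (j : Int) * 4 + col)) : Int × Int × List Int)),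
       (List.range n).map (fun (k : Nat) => 7 + (k : Int) * 4 + col)) := by
  induction n with
  | zero => simp
  | succ n ih => simp [List.range_succ, List.foldl_append, ih]

-- A's neighbor list is the concatenation of the per-column closed forms
theorem a_neighbors_eq (num_rows : Int) (hallway : List (Int × List Int)) :
    (PySem.List.enumerate hallway).foldl
      (fun (acc : List (Int × Int × List Int)) p =>
        ((PySem.List.pyRange 0 num_rows 1).foldl
          (fun (s : List (Int × Int × List Int) × List Int) row =>
            let room_id := 7 + row * 4 + p.1
            (s.1 ++ [(room_id, p.2.1 + row, p.2.2 ++ s.2)], s.2 ++ [room_id]))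
          (acc, [])).1)
      []
    = (PySem.List.enumerate hallway).flatMap (pvGen num_rows) := by
  have hstep : ∀ (acc : List (Int × Int × List Int)) (p : Int × (Int × List Int)),
      ((PySem.List.pyRange 0 num_rows 1).foldl
        (fun (s : List (Int × Int × List Int) × List Int) row =>
          let room_id := 7 + row * 4 + p.1
          (s.1 ++ [(room_id, p.2.1 + row, p.2.2 ++ s.2)], s.2 ++ [room_id]))
        (acc, [])).1 = acc ++ pvGen num_rows p := by
    intro acc p
    rw [PySem.List.pyRange_one]
    simp only [Int.sub_zero, zero_add]
    rw [List.foldl_map]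
    rw [aInner_closed p.1 p.2.1 p.2.2 num_rows.toNat acc]
    rfl
  induction hallway using List.reverseRecOn with
  | nil => simp
  | append_singleton t x ih =>
      rw [PySem.List.enumerate_append, List.foldl_append, List.flatMap_append, ih]
      simp [hstep]

theorem enumerate_map_range {α : Type} (g : Nat → α) (n : Nat) :
    PySem.List.enumerate ((List.range n).map g) 0
    = (List.range n).map (fun (k : Nat) => (((k : Int), g k) : Int × α)) := by
  induction n with
  | zero => simp
  | succ n ih => simp [List.range_succ, PySem.List.enumerate_append, ih, PySem.List.enumerate]

-- B's per-column list equals the same closed form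
theorem b_column_eq (num_rows : Int) (p : Int × (Int × List Int)) :
    (PySem.List.enumerate ((PySem.List.pyRange 0 num_rows 1).map (fun row => 7 + row * 4 + p.1))).map
      (fun q => ((q.2, p.2.1 + q.1,
        p.2.2 ++ PySem.List.slice ((PySem.List.pyRange 0 num_rows 1).map (fun row => 7 + row * 4 + p.1))
          none (some q.1)) : Int × Int × List Int))
    = pvGen num_rows p := by
  rw [PySem.List.pyRange_one]
  simp only [Int.sub_zero, zero_add, List.map_map, Function.comp_def]
  rw [enumerate_map_range, List.map_map]
  unfold pvGen
  apply List.map_congr_left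
  intro k hk
  simp only [Function.comp_def]
  rw [PySem.List.slice_to_natCast, ← List.map_take, List.take_range,
    Nat.min_eq_left (Nat.le_of_lt (List.mem_range.mp hk))]

-- each column's distances are strictly increasing
theorem pvGen_pairwise_lt (num_rows : Int) (p : Int × (Int × List Int)) :
    (pvGen num_rows p).Pairwise (fun a b => a.2.1 < b.2.1) := by
  unfold pvGen
  rw [List.pairwise_map]
  exact List.pairwise_lt_range.imp (fun h => by simp only []; omega)

theorem pvMerge_nil_right (xs : List (Int × Int × List Int)) : pvMerge xs [] = xs := by
  cases xs <;> simp [pvMerge]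

-- insertBy scans past exactly the elements with key ≤ the new key
theorem insertBy_split (y : Int × Int × List Int) (xs : List (Int × Int × List Int)) :
    PySem.List.insertBy (fun a b => decide (a.2.1 < b.2.1)) y xs
    = xs.takeWhile (fun a => decide (a.2.1 ≤ y.2.1)) ++
      y :: xs.dropWhile (fun a => decide (a.2.1 ≤ y.2.1)) := by
  induction xs with
  | nil => rfl
  | cons x xs ih =>
      simp only [PySem.List.insertBy, List.takeWhile, List.dropWhile]
      by_cases h : x.2.1 ≤ y.2.1
      · rw [if_neg (by simp only [decide_eq_true_eq]; omega)]
        simp only [h, ih]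
        simp
      · rw [if_pos (by simp only [decide_eq_true_eq]; omega)]
        simp [h]

-- merging against y :: ys scans past exactly the same prefix
theorem pvMerge_cons_right (y : Int × Int × List Int) (xs ys : List (Int × Int × List Int)) :
    pvMerge xs (y :: ys)
    = xs.takeWhile (fun a => decide (a.2.1 ≤ y.2.1)) ++
      y :: pvMerge (xs.dropWhile (fun a => decide (a.2.1 ≤ y.2.1))) ys := by
  induction xs with
  | nil => simp [pvMerge]
  | cons x xs ih =>
      simp only [pvMerge, List.takeWhile, List.dropWhile]
      by_cases h : x.2.1 ≤ y.2.1
      · simp [h, ih]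
      · simp [h]

-- an insertion whose key dominates a prefix passes over that prefix
theorem insertBy_append (y : Int × Int × List Int) (pre rest : List (Int × Int × List Int))
    (h : ∀ a ∈ pre, a.2.1 ≤ y.2.1) :
    PySem.List.insertBy (fun a b => decide (a.2.1 < b.2.1)) y (pre ++ rest)
    = pre ++ PySem.List.insertBy (fun a b => decide (a.2.1 < b.2.1)) y rest := by
  induction pre with
  | nil => rfl
  | cons a pre ih =>
      simp only [List.cons_append, PySem.List.insertBy]
      rw [if_neg (by simp only [decide_eq_true_eq]; have := h a (by simp); omega)]
      rw [ih (fun b hb => h b (by simp [hb]))]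

-- insertBy-folding a prefix-dominating batch factors through the prefix
theorem foldl_insertBy_append (ys pre rest : List (Int × Int × List Int))
    (h : ∀ y ∈ ys, ∀ a ∈ pre, a.2.1 ≤ y.2.1) :
    ys.foldl (fun acc y => PySem.List.insertBy (fun a b => decide (a.2.1 < b.2.1)) y acc) (pre ++ rest)
    = pre ++ ys.foldl (fun acc y => PySem.List.insertBy (fun a b => decide (a.2.1 < b.2.1)) y acc) rest := by
  induction ys generalizing rest with
  | nil => rfl
  | cons y ys ih =>
      simp only [List.foldl_cons]
      rw [insertBy_append y pre rest (h y (by simp)),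
        ih _ (fun y' hy' a ha => h y' (by simp [hy']) a ha)]

-- MAIN: folding insertBy over a strictly key-increasing batch IS the stable two-pointer merge
theorem foldl_insertBy_eq_merge (ys : List (Int × Int × List Int))
    (hys : ys.Pairwise (fun a b => a.2.1 < b.2.1)) (xs : List (Int × Int × List Int)) :
    ys.foldl (fun acc y => PySem.List.insertBy (fun a b => decide (a.2.1 < b.2.1)) y acc) xs
    = pvMerge xs ys := by
  induction ys generalizing xs with
  | nil => exact (pvMerge_nil_right xs).symm
  | cons y ys ih =>
      rcases List.pairwise_cons.mp hys with ⟨hy, hys'⟩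
      simp only [List.foldl_cons]
      rw [insertBy_split, pvMerge_cons_right]
      rw [show y :: List.dropWhile (fun a => decide (a.2.1 ≤ y.2.1)) xs
            = [y] ++ List.dropWhile (fun a => decide (a.2.1 ≤ y.2.1)) xs from rfl,
        ← List.append_assoc]
      rw [foldl_insertBy_append ys _ _ ?_, ih hys']
      · simp
      · intro y' hy' a ha
        rcases List.mem_append.mp ha with h1 | h1
        · have := List.mem_takeWhile_imp h1
          simp only [decide_eq_true_eq] at this
          have := hy y' hy'
          omega
        · simp only [List.mem_singleton] at h1
          subst h1
          exact le_of_lt (hy y' hy')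

theorem main_eq (num_rows : Int) (hallway : List (Int × List Int)) :
    get_rooms num_rows hallway = get_rooms_alt num_rows hallway := by
  unfold get_rooms get_rooms_alt
  rw [a_neighbors_eq]
  rw [PySem.List.sorted_eq_foldl_insertBy]
  have hcol : ∀ (res : List (Int × Int × List Int)) (p : Int × (Int × List Int)),
      pvMerge res
        ((PySem.List.enumerate ((PySem.List.pyRange 0 num_rows 1).map (fun row => 7 + row * 4 + p.1))).map
          (fun q => (q.2, p.2.1 + q.1,
            p.2.2 ++ PySem.List.slice ((PySem.List.pyRange 0 num_rows 1).map (fun row => 7 + row * 4 + p.1))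
              none (some q.1))))
      = (pvGen num_rows p).foldl
          (fun acc y => PySem.List.insertBy (fun a b => decide (a.2.1 < b.2.1)) y acc) res := by
    intro res p
    rw [b_column_eq, foldl_insertBy_eq_merge _ (pvGen_pairwise_lt num_rows p)]
  induction hallway using List.reverseRecOn with
  | nil => simp
  | append_singleton t x ih =>
      rw [PySem.List.enumerate_append, List.flatMap_append, List.foldl_append, List.foldl_append, ← ih]
      simp [hcol]

-- ===== VERDICT (by name: the statement is the Claim_ definition above) =====
theorem get_rooms_spec : Claim_equal_get_rooms := by
  intro num_rows hallway _
  exact main_eq num_rows hallway
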